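-- pv_equiv track=rewrite | github.com/ivanillera/TP1Sintaxis | Lexer.py | a_else
-- ===== SOURCE A (Python) =====
-- TRAMPA = -1
--
-- RESULTADO_ACEPTADO = "ACEPTADO"
--
-- RESULTADO_TRAMPA = "TRAMPA"
--
-- RESULTADO_NO_ACEPTADO = "NO_ACEPTADO"
--
-- def d_else(estado_anterior, caracter):
-- 	if estado_anterior == 0 and caracter == "e":
-- 		return 1
-- 	if estado_anterior == 1 and caracter == "l":
-- 		return 2
-- 	if estado_anterior == 2 and caracter == "s":
-- 		return 3
-- 	if estado_anterior == 3 and caracter == "e":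
-- 		return 4
--
--
-- 	return RESULTADO_TRAMPA
--
-- def a_else(cadena):
-- 	Finales = [4]
-- 	estado_actual = 0
--
-- 	for caracter in cadena:
-- 		estado_proximo = d_else(estado_actual, caracter)
-- 		if estado_proximo == TRAMPA:
-- 			return RESULTADO_TRAMPA
-- 		estado_actual = estado_proximo
--
-- 	if estado_actual in Finales:
-- 		return RESULTADO_ACEPTADO
-- 	else:
-- 		return RESULTADO_NO_ACEPTADO
-- ===== SOURCE B (Python) =====
-- RESULTADO_ACEPTADO = "ACEPTADO"
-- RESULTADO_NO_ACEPTADO = "NO_ACEPTADO"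
--
-- def a_else(cadena):
--     return RESULTADO_ACEPTADO if list(cadena) == ["e", "l", "s", "e"] else RESULTADO_NO_ACEPTADO
-- ===== Notes on version B (the rewrite author's own statement) =====
-- stated objective: simpler
-- what changed: Replaced the DFA transition loop (whose TRAMPA branch is dead code because the int sentinel -1 is compared against the string 'TRAMPA') with a single equality check of the materialized input against ['e','l','s','e'].
import Mathlib
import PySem

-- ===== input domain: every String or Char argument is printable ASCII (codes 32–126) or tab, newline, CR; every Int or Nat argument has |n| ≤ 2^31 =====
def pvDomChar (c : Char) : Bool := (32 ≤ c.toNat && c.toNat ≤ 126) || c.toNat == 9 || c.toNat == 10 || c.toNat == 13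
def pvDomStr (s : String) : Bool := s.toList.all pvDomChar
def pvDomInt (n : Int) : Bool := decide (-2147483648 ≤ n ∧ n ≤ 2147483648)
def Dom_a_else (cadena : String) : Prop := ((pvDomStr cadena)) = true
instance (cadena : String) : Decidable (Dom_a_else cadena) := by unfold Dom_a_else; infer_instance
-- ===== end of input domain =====

-- ===== PORT A =====
-- Header: B replaces the DFA loop (its TRAMPA check is dead: the int sentinel -1 is
-- compared against the string "TRAMPA") with one equality check against ['e','l','s','e']; simpler.

-- Python's estado is dynamically typed: an int, or the string "TRAMPA" once d_else falls through.
inductive PyEstado where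
  | num : Int → PyEstado
  | trampa : PyEstado   -- the string RESULTADO_TRAMPA held in estado_actual
deriving DecidableEq, Repr

def d_else (estado_anterior : PyEstado) (caracter : Char) : PyEstado :=
  if estado_anterior = .num 0 ∧ caracter = 'e' then .num 1
  else if estado_anterior = .num 1 ∧ caracter = 'l' then .num 2
  else if estado_anterior = .num 2 ∧ caracter = 's' then .num 3
  else if estado_anterior = .num 3 ∧ caracter = 'e' then .num 4
  else .trampa

-- the for-loop with its early return ("TRAMPA" if estado_proximo == -1, which never fires
-- since "TRAMPA" == -1 is False in Python) and the final membership test in Finales = [4]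
def a_else_loop (estado_actual : PyEstado) (cs : List Char) : String :=
  match cs with
  | [] => if estado_actual = .num 4 then "ACEPTADO" else "NO_ACEPTADO"
  | c :: rest =>
    let estado_proximo := d_else estado_actual c
    if estado_proximo = .num (-1) then "TRAMPA"
    else a_else_loop estado_proximo rest

def a_else (cadena : String) : String := a_else_loop (.num 0) cadena.toList

-- ===== PORT B =====
def a_else_alt (cadena : String) : String :=
  if cadena.toList = ['e', 'l', 's', 'e'] then "ACEPTADO" else "NO_ACEPTADO"

-- ===== PRECONDITION & SPEC =====
def Spec_a_else (cadena : String) (out : String) : Prop := out = a_else_alt cadena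
instance (cadena : String) (out : String) : Decidable (Spec_a_else cadena out) := by unfold Spec_a_else; infer_instance

-- ===== CLAIM (what is proved, stated in full; the proofs are below) =====
def Claim_equal_a_else : Prop := ∀ (cadena : String), Dom_a_else cadena → Spec_a_else cadena (a_else cadena)

-- ===== LEMMAS AND PROOFS =====

theorem loop_trampa (cs : List Char) : a_else_loop .trampa cs = "NO_ACEPTADO" := by
  induction cs with
  | nil => rfl
  | cons c rest ih =>
    simp only [a_else_loop, d_else]
    split_ifs with h1 h2 h3 h4 h5 <;> simp_all

theorem loop_from (k : Int) (hk : k = 0 ∨ k = 1 ∨ k = 2 ∨ k = 3 ∨ k = 4) (cs : List Char) :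
    a_else_loop (.num k) cs =
      (if (k = 0 ∧ cs = ['e','l','s','e']) ∨ (k = 1 ∧ cs = ['l','s','e']) ∨
          (k = 2 ∧ cs = ['s','e']) ∨ (k = 3 ∧ cs = ['e']) ∨ (k = 4 ∧ cs = [])
       then "ACEPTADO" else "NO_ACEPTADO") := by
  induction cs generalizing k with
  | nil =>
    simp only [a_else_loop]
    rcases hk with h|h|h|h|h <;> subst h <;> simp
  | cons c rest ih =>
    simp only [a_else_loop, d_else]
    rcases hk with h|h|h|h|h <;> subst h <;> by_cases hc : c = 'e' <;>
      by_cases hl : c = 'l' <;> by_cases hs : c = 's' <;>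
      simp_all [loop_trampa, ih 1 (by omega), ih 2 (by omega), ih 3 (by omega), ih 4 (by omega)]

-- ===== VERDICT (by name: the statement is the Claim_ definition above) =====
theorem a_else_spec : Claim_equal_a_else := by
  intro cadena _
  unfold Spec_a_else a_else a_else_alt
  rw [loop_from 0 (by omega)]
  simp
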